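-- pv_equiv track=rewrite | github.com/ThomasHEBRARD/dtu | 02269_process_mining/assignment2.py | dependency_graph
-- ===== SOURCE A (Python) =====
-- def dependency_graph(log):
--     TEMP = {}
--     for tasks in log.values():
--         for i in range(len(tasks) - 1):
--             if tasks[i] not in TEMP:
--                 TEMP[tasks[i]] = {tasks[i + 1]: 1}
--             elif tasks[i + 1] not in TEMP[tasks[i]]:
--                 TEMP[tasks[i]][tasks[i + 1]] = 1
--             else:
--                 TEMP[tasks[i]][tasks[i + 1]] += 1
--     return TEMP
-- ===== SOURCE B (Python) =====
-- def dependency_graph(log):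
--     # Pass 1: GROUP (no counting): collect, per first task, the list of its
--     # successors in scan order.
--     succs = {}
--     for tasks in log.values():
--         for a, b in zip(tasks, tasks[1:]):
--             succs.setdefault(a, []).append(b)
--     # Pass 2: per group, deduplicate the successors (first-occurrence order)
--     # and obtain each frequency by a counting query on the group list.
--     temp = {}
--     for a, lst in succs.items():
--         temp[a] = {b: lst.count(b) for b in dict.fromkeys(lst)}
--     return temp
-- ===== Notes on version B (the rewrite author's own statement) =====
-- stated objective: alternative
-- what changed: A counts incrementally in one sweep, updating a nested dict with a three-way branch and += for every adjacent pair; B never increments: a first pass only GROUPS each task's successors into plain lists (setdefault-append), and a second pass fills the nested dict per group by deduplicating the group with dict.fromkeys and answering each frequency with a list.count query on the group list.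
import Mathlib
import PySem

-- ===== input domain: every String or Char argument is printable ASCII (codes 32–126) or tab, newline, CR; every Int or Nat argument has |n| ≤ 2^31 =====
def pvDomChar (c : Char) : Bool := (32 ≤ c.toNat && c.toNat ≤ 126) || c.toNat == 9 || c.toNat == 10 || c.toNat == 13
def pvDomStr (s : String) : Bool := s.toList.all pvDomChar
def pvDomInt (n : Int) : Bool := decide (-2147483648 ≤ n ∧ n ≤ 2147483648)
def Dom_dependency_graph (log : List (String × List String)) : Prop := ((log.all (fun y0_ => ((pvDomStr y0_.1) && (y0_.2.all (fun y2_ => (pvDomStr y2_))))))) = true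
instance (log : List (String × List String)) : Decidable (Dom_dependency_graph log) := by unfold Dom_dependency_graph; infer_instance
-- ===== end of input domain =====

-- B replaces A's one-sweep incremental counting (three-way branch and += per adjacent pair) by
-- group-then-query: it first only GROUPS each task's successors into plain lists (appending,
-- no counts), then fills the nested dict per group from dedup'd successors with list.count
-- queries (objective: alternative).

abbrev DG := PySem.Dict String (PySem.Dict String Int)

-- ===== PORT A =====
-- Transliteration of A. The log dict becomes PySem.Dict.ofList log (duplicate keys collapse as in
-- Python's dict constructor). Indices i and i+1 produced by range(len(tasks)-1) are always in
-- range, so tasks[i] is ported as pyGetD with an unreachable default. The in-place mutation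
-- TEMP[tasks[i]][tasks[i+1]] += 1 is modeled by re-inserting the modified inner dict (same key,
-- position kept). The returned nested dict is rendered as an association list per the type
-- convention.
def dependency_graph (log : List (String × List String)) : List (String × List (String × Int)) :=
  (((PySem.Dict.ofList log).values).foldl (fun TEMP tasks =>
      (PySem.List.pyRange 0 ((tasks.length : Int) - 1)).foldl (fun TEMP i =>
        let a := PySem.List.pyGetD tasks i ""
        let b := PySem.List.pyGetD tasks (i + 1) ""
        if TEMP.contains a = false then
          TEMP.insert a (PySem.Dict.empty.insert b 1)
        else if (TEMP.getD a PySem.Dict.empty).contains b = false then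
          TEMP.insert a ((TEMP.getD a PySem.Dict.empty).insert b 1)
        else
          TEMP.insert a ((TEMP.getD a PySem.Dict.empty).insert b
            ((TEMP.getD a PySem.Dict.empty).getD b 0 + 1))) TEMP)
    (PySem.Dict.empty : DG)).items.map (fun p => (p.1, p.2.items))

-- ===== PORT B =====
-- zip(tasks, tasks[1:])
def dgPairs (tasks : List String) : List (String × String) :=
  tasks.zip (PySem.List.slice tasks (some 1))

-- Pass 1: succs.setdefault(a, []).append(b) — i.e. succs[a] = succs.get(a, []) + [b],
-- which is Dict.modify with default [].
def dgSuccs (log : List (String × List String)) : PySem.Dict String (List String) :=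
  ((PySem.Dict.ofList log).values).foldl (fun succs tasks =>
    (dgPairs tasks).foldl (fun succs p => succs.modify p.1 [] (fun l => l ++ [p.2])) succs)
    PySem.Dict.empty

-- {b: lst.count(b) for b in dict.fromkeys(lst)}
def dgCounts (lst : List String) : PySem.Dict String Int :=
  (PySem.List.dedup lst).foldl (fun d b => d.insert b ((lst.count b : Nat) : Int)) PySem.Dict.empty

-- Pass 2: for a, lst in succs.items(): temp[a] = {b: lst.count(b) for b in dict.fromkeys(lst)}
def dependency_graph_alt (log : List (String × List String)) : List (String × List (String × Int)) :=
  ((dgSuccs log).items.foldl (fun temp q => temp.insert q.1 (dgCounts q.2))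
    (PySem.Dict.empty : DG)).items.map (fun p => (p.1, p.2.items))

-- ===== PRECONDITION & SPEC =====
def Spec_dependency_graph (log : List (String × List String)) (out : List (String × List (String × Int))) : Prop := out = dependency_graph_alt log
instance (log : List (String × List String)) (out : List (String × List (String × Int))) : Decidable (Spec_dependency_graph log out) := by unfold Spec_dependency_graph; infer_instance

-- ===== CLAIM (what is proved, stated in full; the proofs are below) =====
def Claim_equal_dependency_graph : Prop := ∀ (log : List (String × List String)), Dom_dependency_graph log → Spec_dependency_graph log (dependency_graph log)

-- ===== LEMMAS AND PROOFS =====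

-- One nesting step over an ((a,b), n) item, in normal form.
def nstep (T : DG) (q : (String × String) × Int) : DG :=
  T.insert q.1.1 ((T.getD q.1.1 PySem.Dict.empty).insert q.1.2 q.2)

-- The nested count stored for pair k.
def nget (T : DG) (k : String × String) : Int :=
  (T.getD k.1 PySem.Dict.empty).getD k.2 0

-- A's per-pair step, in normal form.
def stepN (T : DG) (p : String × String) : DG := nstep T (p, nget T p + 1)

-- The successors of a among the pairs ps, in order.
def sel (a : String) (ps : List (String × String)) : List String :=
  (ps.filter (fun p => p.1 == a)).map (·.2)

-- The common normal form of both results.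
def innerG (a : String) (ps : List (String × String)) : List (String × Int) :=
  (PySem.List.dedup (sel a ps)).map (fun b => (b, (((sel a ps).count b : Nat) : Int)))

def outG (ps : List (String × String)) : List (String × List (String × Int)) :=
  (PySem.List.dedup (ps.map (·.1))).map (fun a => (a, innerG a ps))

theorem dgPairs_eq_zip_tail (tasks : List String) : dgPairs tasks = tasks.zip tasks.tail := by
  unfold dgPairs
  rw [PySem.List.slice_from tasks (by norm_num : (0:Int) ≤ 1)]
  simp [List.drop_one]

-- A's three-way branch is stepN.
theorem astep_eq_stepN (T : DG) (a b : String) :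
    (if T.contains a = false then
      T.insert a (PySem.Dict.empty.insert b 1)
    else if (T.getD a PySem.Dict.empty).contains b = false then
      T.insert a ((T.getD a PySem.Dict.empty).insert b 1)
    else
      T.insert a ((T.getD a PySem.Dict.empty).insert b
        ((T.getD a PySem.Dict.empty).getD b 0 + 1))) = stepN T (a, b) := by
  unfold stepN nstep nget
  split_ifs with h1 h2
  · rw [PySem.Dict.getD_of_not_contains _ _ h1]
    simp [PySem.Dict.getD_empty]
  · rw [PySem.Dict.getD_of_not_contains _ _ h2]
    norm_num
  · rfl

-- range(len(tasks)-1) indexing yields exactly the adjacent pairs.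
theorem range_pairs (tasks : List String) :
    (PySem.List.pyRange 0 ((tasks.length : Int) - 1)).map
      (fun i => (PySem.List.pyGetD tasks i "", PySem.List.pyGetD tasks (i + 1) "")) =
    tasks.zip tasks.tail := by
  cases tasks with
  | nil => rfl
  | cons x rest =>
    have hlen : (((x :: rest).length : Int) - 1) = ((rest.length : Nat) : Int) := by
      simp
    rw [hlen, PySem.List.pyRange_zero_natCast, List.map_map]
    apply List.ext_getElem
    · simp
    · intro i h1 h2
      have hi : i < rest.length := by simpa using h1
      simp only [List.getElem_map, List.getElem_range, Function.comp_apply]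
      rw [List.getElem_zip]
      have e1 : PySem.List.pyGetD (x :: rest) ((i : Nat) : Int) "" = (x :: rest)[i] := by
        rw [PySem.List.pyGetD_eq_getElem _ _ (by positivity) (by simp; omega)]
        simp
      have e2 : PySem.List.pyGetD (x :: rest) (((i : Nat) : Int) + 1) "" = rest[i] := by
        have hc : (((i : Nat) : Int) + 1) = (((i + 1 : Nat) : Nat) : Int) := by push_cast; ring
        rw [hc, PySem.List.pyGetD_eq_getElem _ _ (by positivity) (by simp; omega)]
        simp
      rw [e1, e2]
      simp

theorem foldl_flatMap_eq {α β γ : Type} (ls : List α) (g : α → List β) (f : γ → β → γ) (x : γ) :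
    ls.foldl (fun x t => (g t).foldl f x) x = (ls.flatMap g).foldl f x := by
  induction ls generalizing x with
  | nil => rfl
  | cons h t ih =>
    simp only [List.foldl_cons, List.flatMap_cons, List.foldl_append]
    exact ih _

-- A's whole pass = a stepN fold over the flattened pair list.
theorem a_pass (vals : List (List String)) (T : DG) :
    vals.foldl (fun TEMP tasks =>
      (PySem.List.pyRange 0 ((tasks.length : Int) - 1)).foldl (fun TEMP i =>
        let a := PySem.List.pyGetD tasks i ""
        let b := PySem.List.pyGetD tasks (i + 1) ""
        if TEMP.contains a = false then
          TEMP.insert a (PySem.Dict.empty.insert b 1)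
        else if (TEMP.getD a PySem.Dict.empty).contains b = false then
          TEMP.insert a ((TEMP.getD a PySem.Dict.empty).insert b 1)
        else
          TEMP.insert a ((TEMP.getD a PySem.Dict.empty).insert b
            ((TEMP.getD a PySem.Dict.empty).getD b 0 + 1))) TEMP) T
    = (vals.flatMap dgPairs).foldl stepN T := by
  rw [← foldl_flatMap_eq]
  congr 1
  funext TEMP tasks
  rw [dgPairs_eq_zip_tail, ← range_pairs, List.foldl_map]
  congr 1
  funext TEMP i
  exact astep_eq_stepN TEMP _ _

-- dict.fromkeys over xs ++ [x]: the new key appends iff it is new.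
theorem dedup_append_singleton {α : Type} [BEq α] [LawfulBEq α] (xs : List α) (x : α) :
    PySem.List.dedup (xs ++ [x]) =
      if x ∈ xs then PySem.List.dedup xs else PySem.List.dedup xs ++ [x] := by
  rw [PySem.List.dedup_eq_ofList, PySem.List.dedup_eq_ofList,
      PySem.Set.ofList_eq_foldl (xs ++ [x]), List.foldl_append, List.foldl_cons, List.foldl_nil,
      ← PySem.Set.ofList_eq_foldl]
  show PySem.Set.add (PySem.Set.ofList xs) x = _
  unfold PySem.Set.add PySem.Set.contains
  by_cases hx : x ∈ xs
  · simp [(PySem.Set.mem_ofList xs x).mpr hx, hx]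
  · simp [hx]

theorem sel_append_singleton (a : String) (ps : List (String × String)) (p : String × String) :
    sel a (ps ++ [p]) = sel a ps ++ (if p.1 = a then [p.2] else []) := by
  unfold sel
  rw [List.filter_append]
  by_cases h : p.1 = a <;> simp [h]

theorem sel_nil_of_not_mem (a : String) (ps : List (String × String))
    (h : a ∉ ps.map (·.1)) : sel a ps = [] := by
  unfold sel
  rw [List.filter_eq_nil_iff.mpr, List.map_nil]
  intro p hp
  simp only [beq_iff_eq]
  exact fun he => h (List.mem_map.mpr ⟨p, hp, he⟩)

-- ==== characterization of A's incremental fold ====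

theorem stepN_items (ps : List (String × String)) :
    ((ps.foldl stepN (PySem.Dict.empty : DG)).items).map (fun p => (p.1, p.2.items)) = outG ps := by
  induction ps using List.reverseRecOn with
  | nil => simp [outG, PySem.List.dedup, PySem.Dict.empty]
  | append_singleton ps p ih =>
    set F := ps.foldl stepN (PySem.Dict.empty : DG) with hF
    have hkeys : F.keys = PySem.List.dedup (ps.map (·.1)) := by
      have h1 := congrArg (List.map (·.1)) ih
      simp only [List.map_map] at h1
      have h2 : ((fun p : String × List (String × Int) => p.1) ∘
          (fun p : String × PySem.Dict String Int => (p.1, p.2.items))) =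
          (fun p : String × PySem.Dict String Int => p.1) := rfl
      rw [h2] at h1
      have h3 : (outG ps).map (·.1) = PySem.List.dedup (ps.map (·.1)) := by
        unfold outG; rw [List.map_map]; simp [Function.comp_def]
      rw [h3] at h1
      exact h1
    have hnodup : F.keys.Nodup := by rw [hkeys]; exact PySem.List.nodup_dedup _
    rw [List.foldl_append, List.foldl_cons, List.foldl_nil, ← hF]
    show ((stepN F p).items).map (fun p => (p.1, p.2.items)) = outG (ps ++ [p])
    unfold outG
    rw [show (ps ++ [p]).map (·.1) = ps.map (·.1) ++ [p.1] by simp,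
        dedup_append_singleton]
    by_cases ha : p.1 ∈ ps.map (·.1)
    · -- existing outer key
      rw [if_pos ha]
      have hc : F.contains p.1 = true := by
        rw [PySem.Dict.contains_iff_mem_keys, hkeys, PySem.List.mem_dedup]
        exact ha
      -- the inner dict X at p.1
      have hmemk : p.1 ∈ F.keys := (PySem.Dict.contains_iff_mem_keys F p.1).mp hc
      obtain ⟨q, hq, hq1⟩ := List.mem_map.mp (by
        simpa [PySem.Dict.keys] using hmemk : p.1 ∈ F.items.map (·.1))
      obtain ⟨a0, X⟩ := q
      rw [show a0 = p.1 from hq1] at hq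
      have hX : F.getD p.1 PySem.Dict.empty = X :=
        PySem.Dict.getD_of_mem_items F hq hnodup _
      have hXitems : X.items = innerG p.1 ps := by
        have : (p.1, X.items) ∈ (F.items).map (fun p => (p.1, p.2.items)) :=
          List.mem_map.mpr ⟨(p.1, X), hq, rfl⟩
        rw [ih] at this
        obtain ⟨a1, _, he⟩ := List.mem_map.mp this
        have ha1 : a1 = p.1 := congrArg Prod.fst he
        rw [ha1] at he
        exact (Prod.ext_iff.mp he).2.symm
      have hXkeys : X.keys = PySem.List.dedup (sel p.1 ps) := by
        have := congrArg (List.map (·.1)) hXitems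
        unfold innerG at this
        rw [List.map_map] at this
        simpa [PySem.Dict.keys, Function.comp_def] using this
      have hXnodup : X.keys.Nodup := by rw [hXkeys]; exact PySem.List.nodup_dedup _
      have hnget : nget F p = (((sel p.1 ps).count p.2 : Nat) : Int) := by
        unfold nget
        rw [hX]
        by_cases hb : p.2 ∈ sel p.1 ps
        · refine PySem.Dict.getD_of_mem_items X ?_ hXnodup 0
          rw [hXitems]
          unfold innerG
          exact List.mem_map.mpr ⟨p.2, by rw [PySem.List.mem_dedup]; exact hb, rfl⟩
        · have hcb : X.contains p.2 = false := by
            rw [← Bool.not_eq_true, PySem.Dict.contains_iff_mem_keys, hXkeys,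
              PySem.List.mem_dedup]
            exact hb
          rw [PySem.Dict.getD_of_not_contains _ _ hcb, List.count_eq_zero.mpr hb]
          simp
      -- the updated inner dict value
      set V := X.insert p.2 (nget F p + 1) with hV
      have hVitems : V.items = innerG p.1 (ps ++ [p]) := by
        have hsel : sel p.1 (ps ++ [p]) = sel p.1 ps ++ [p.2] := by
          rw [sel_append_singleton, if_pos rfl]
        unfold innerG
        rw [hsel, dedup_append_singleton]
        by_cases hb : p.2 ∈ sel p.1 ps
        · -- existing inner key: map-update
          rw [if_pos hb]
          have hcb : X.contains p.2 = true := by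
            rw [PySem.Dict.contains_iff_mem_keys, hXkeys, PySem.List.mem_dedup]; exact hb
          rw [hV, PySem.Dict.items_insert_of_contains _ _ hcb, hXitems]
          unfold innerG
          rw [List.map_map]
          apply List.map_congr_left
          intro b' _
          simp only [Function.comp_apply, beq_iff_eq]
          by_cases hbb : b' = p.2
          · subst hbb
            simp only [hnget, List.count_append, List.count_singleton, beq_self_eq_true]
            push_cast
            ring_nf
          · have hz : List.count b' [p.2] = 0 := List.count_eq_zero.mpr (by simp [hbb])
            simp [hbb, List.count_append, hz]
        · -- fresh inner key: append
          rw [if_neg hb]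
          have hcb : X.contains p.2 = false := by
            rw [← Bool.not_eq_true, PySem.Dict.contains_iff_mem_keys, hXkeys,
              PySem.List.mem_dedup]
            exact hb
          rw [hV, PySem.Dict.items_insert_of_not_contains _ _ hcb, hXitems, List.map_append]
          congr 1
          · unfold innerG
            apply List.map_congr_left
            intro b' hb'
            have hb'mem : b' ∈ sel p.1 ps := (PySem.List.mem_dedup _ _).mp hb'
            have hbb : b' ≠ p.2 := fun he => hb (he ▸ hb'mem)
            have hz : List.count b' [p.2] = 0 := List.count_eq_zero.mpr (by simp [hbb])
            simp [List.count_append, hz]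
          · simp [hnget, List.count_eq_zero.mpr hb, List.count_append]
      -- outer: map-update through the rendering map
      have hstep : stepN F p = F.insert p.1 V := by
        rw [hV, ← hX]; rfl
      rw [hstep, PySem.Dict.items_insert_of_contains _ _ hc, List.map_map]
      have hcomp : ((fun r : String × PySem.Dict String Int => (r.1, r.2.items)) ∘
          (fun r : String × PySem.Dict String Int =>
            if (r.1 == p.1) = true then (p.1, V) else r)) =
          ((fun r : String × List (String × Int) =>
            if (r.1 == p.1) = true then (p.1, V.items) else r) ∘
          (fun r : String × PySem.Dict String Int => (r.1, r.2.items))) := by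
        funext r
        simp only [Function.comp_apply]
        by_cases h : r.1 = p.1 <;> simp [h]
      rw [hcomp, ← List.map_map, ih]
      unfold outG
      rw [List.map_map]
      apply List.map_congr_left
      intro a' ha'
      simp only [Function.comp_apply, beq_iff_eq]
      by_cases haa : a' = p.1
      · rw [if_pos haa, haa, hVitems]
      · rw [if_neg haa]
        have : sel a' (ps ++ [p]) = sel a' ps := by
          rw [sel_append_singleton, if_neg (fun he => haa he.symm), List.append_nil]
        unfold innerG
        rw [this]
    · -- fresh outer key
      rw [if_neg ha]
      have hc : F.contains p.1 = false := by
        rw [← Bool.not_eq_true, PySem.Dict.contains_iff_mem_keys, hkeys,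
          PySem.List.mem_dedup]
        exact ha
      have hsel0 : sel p.1 ps = [] := sel_nil_of_not_mem _ _ ha
      have hnget : nget F p = 0 := by
        unfold nget
        rw [PySem.Dict.getD_of_not_contains _ _ hc, PySem.Dict.getD_empty]
      show ((F.insert p.1 ((F.getD p.1 PySem.Dict.empty).insert p.2 (nget F p + 1))).items).map
        (fun r => (r.1, r.2.items)) = _
      rw [PySem.Dict.getD_of_not_contains _ _ hc, hnget,
        PySem.Dict.items_insert_of_not_contains _ _ hc, List.map_append, ih]
      unfold outG
      rw [List.map_append]
      congr 1
      · apply List.map_congr_left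
        intro a' ha'
        have haa : a' ≠ p.1 := by
          intro he
          exact ha (he ▸ (PySem.List.mem_dedup _ _).mp ha')
        have : sel a' (ps ++ [p]) = sel a' ps := by
          rw [sel_append_singleton, if_neg (fun he => haa he.symm), List.append_nil]
        unfold innerG
        rw [this]
      · have hsel : sel p.1 (ps ++ [p]) = [p.2] := by
          rw [sel_append_singleton, if_pos rfl, hsel0, List.nil_append]
        have hemp : (PySem.Dict.empty : PySem.Dict String Int).contains p.2 = false := by
          simp [PySem.Dict.contains_empty]
        simp only [List.map_cons, List.map_nil]
        rw [PySem.Dict.items_insert_of_not_contains _ _ hemp]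
        unfold innerG
        rw [hsel]
        simp [PySem.List.dedup, PySem.Set.ofList_eq_foldl, PySem.Set.add,
          PySem.Dict.empty, PySem.Set.contains]
-- ==== characterization of B's two passes ====

theorem b_succs (log : List (String × List String)) :
    dgSuccs log = (((PySem.Dict.ofList log).values).flatMap dgPairs).foldl
      (fun d p => d.modify p.1 [] (fun l => l ++ [p.2])) PySem.Dict.empty := by
  unfold dgSuccs
  rw [foldl_flatMap_eq]

theorem b_out (log : List (String × List String)) :
    dependency_graph_alt log = outG (((PySem.Dict.ofList log).values).flatMap dgPairs) := by
  set ps := ((PySem.Dict.ofList log).values).flatMap dgPairs with hps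
  set S := dgSuccs log with hS
  have hSkeys : S.keys = PySem.List.dedup (ps.map (·.1)) := by
    rw [hS, b_succs, ← hps]
    rw [PySem.Dict.keys_foldl_modify_key ps (fun p => p.1) [] (fun _ p l => l ++ [p.2])
      PySem.Dict.empty]
    rw [PySem.List.dedup_eq_ofList, PySem.Set.ofList_eq_foldl]
    rfl
  have hSnodup : S.keys.Nodup := by rw [hSkeys]; exact PySem.List.nodup_dedup _
  have hSgetD : ∀ a, S.getD a [] = sel a ps := by
    intro a
    rw [hS, b_succs, ← hps, PySem.Dict.getD_foldl_modify_append, PySem.Dict.getD_empty]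
    rfl
  have hSitems : S.items = S.keys.map (fun a => (a, sel a ps)) := by
    rw [PySem.Dict.items_eq_map_keys S hSnodup []]
    apply List.map_congr_left
    intro a _
    rw [hSgetD a]
  have hCounts : ∀ lst : List String,
      (dgCounts lst).items = (PySem.List.dedup lst).map (fun b => (b, ((lst.count b : Nat) : Int))) := by
    intro lst
    unfold dgCounts
    rw [PySem.Dict.items_foldl_insert_fresh (PySem.List.dedup lst) (fun b => b)
      (fun b => ((lst.count b : Nat) : Int)) PySem.Dict.empty
      (fun b _ => by simp [PySem.Dict.contains_empty])
      (by simpa using PySem.List.nodup_dedup lst)]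
    simp [PySem.Dict.empty]
  unfold dependency_graph_alt
  rw [PySem.Dict.items_foldl_insert_fresh S.items (fun q => q.1) (fun q => dgCounts q.2)
    PySem.Dict.empty (fun q _ => by simp [PySem.Dict.contains_empty])
    (by simpa [PySem.Dict.keys] using hSnodup)]
  have hemp : (PySem.Dict.empty : DG).items = [] := rfl
  rw [hemp, List.nil_append, List.map_map, hSitems, List.map_map]
  unfold outG
  rw [← hSkeys]
  apply List.map_congr_left
  intro a _
  simp only [Function.comp_apply]
  rw [hCounts]
  rfl

theorem main_eq (log : List (String × List String)) :
    dependency_graph log = dependency_graph_alt log := by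
  unfold dependency_graph
  rw [a_pass, b_out, stepN_items]

-- ===== VERDICT (by name: the statement is the Claim_ definition above) =====
theorem dependency_graph_spec : Claim_equal_dependency_graph := by
  intro log _
  unfold Spec_dependency_graph
  exact main_eq log
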